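-- pv_equiv track=rewrite | github.com/NaayoungKwon/AlgorithmStudy | 백준/Silver/1713. 후보 추천하기/후보 추천하기.py | solution
-- ===== SOURCE A (Python) =====
-- def solution(n,m,que):
--
--     pic = [];
--     vote = [];
--     for p in que:
--         if p in pic:
--             idx = pic.index(p);
--             vote[idx] += 1;
--         elif len(pic) < n:
--             pic.append(p);
--             vote.append(1);
--         else:
--             idx = vote.index(min(vote));
--             pic = pic[:idx] + pic[idx+1:] + [p] ;
--             vote = vote[:idx] + vote[idx+1:] + [1] ;
--     pic.sort();
--     return pic;
-- ===== SOURCE B (Python) =====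
-- def _insert_sorted(frame, item):
--     return ([x for x in frame if x < item] + [item] +
--             [x for x in frame if x >= item])
--
--
-- def solution(n, m, que):
--     # frame holds (votes, entry_time, candidate) triples kept in ascending
--     # priority order, so the eviction victim is always frame[0].
--     frame = []
--     t = 0
--     for p in que:
--         old = [item for item in frame if item[2] == p]
--         if old:
--             votes, entry, _ = old[0]
--             frame = _insert_sorted([item for item in frame if item[2] != p],
--                                    (votes + 1, entry, p))
--         else:
--             if len(frame) >= n:
--                 frame = frame[1:]
--             frame = _insert_sorted(frame, (1, t, p))
--         t += 1
--     return sorted(cand for _, _, cand in frame)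
-- ===== Notes on version B (the rewrite author's own statement) =====
-- stated objective: alternative
-- what changed: B replaces A's parallel lists with min-scan + index-scan + slice-rebuild eviction by a single priority-ordered list of (votes, entry_time, candidate) triples maintained in sorted order, so the eviction victim is always the head (no min() or .index() calls) and re-votes are a remove-and-reinsert into the ordered structure.
import Mathlib
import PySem

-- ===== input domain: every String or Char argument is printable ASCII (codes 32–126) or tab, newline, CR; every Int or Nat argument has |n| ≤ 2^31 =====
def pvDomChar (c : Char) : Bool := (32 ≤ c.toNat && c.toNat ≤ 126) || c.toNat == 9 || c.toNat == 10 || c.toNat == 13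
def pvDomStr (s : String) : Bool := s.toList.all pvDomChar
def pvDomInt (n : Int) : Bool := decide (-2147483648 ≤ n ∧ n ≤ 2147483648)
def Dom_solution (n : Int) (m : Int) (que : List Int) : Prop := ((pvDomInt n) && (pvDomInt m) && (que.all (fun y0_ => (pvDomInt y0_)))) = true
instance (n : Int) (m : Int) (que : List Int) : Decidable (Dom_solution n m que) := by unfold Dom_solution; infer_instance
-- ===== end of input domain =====

-- B replaces A's parallel lists (min/index scans, slice rebuilds) by one priority-ordered
-- list of (votes, entry, candidate) triples whose head is always the eviction victim.


-- ===== PORT A =====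
-- one iteration of A's 'for p in que' loop over the state (pic, vote)
def solStepA (n : Int) (st : List Int × List Int) (p : Int) : List Int × List Int :=
  let pic := st.1
  let vote := st.2
  if pic.contains p then
    -- idx = pic.index(p); vote[idx] += 1   (index? is some here since p ∈ pic)
    let idx := (PySem.List.index? pic p).getD 0
    (pic, vote.set idx (vote.getD idx 0 + 1))
  else if (pic.length : Int) < n then
    (pic ++ [p], vote ++ [1])
  else
    -- idx = vote.index(min(vote)); Python raises ValueError when vote = [] (excluded by Pre_)
    match PySem.List.min? vote id with
    | none => (pic, vote)
    | some mn =>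
      let idx := (PySem.List.index? vote mn).getD 0
      (PySem.List.slice pic none (some (idx : Int)) ++ PySem.List.slice pic (some ((idx : Int) + 1)) none ++ [p],
       PySem.List.slice vote none (some (idx : Int)) ++ PySem.List.slice vote (some ((idx : Int) + 1)) none ++ [1])

def solution (n : Int) (m : Int) (que : List Int) : List Int :=
  PySem.List.sorted (que.foldl (solStepA n) ([], [])).1 (fun x => x) false

-- ===== PORT B =====
-- Python tuple-< on (votes, entry, cand) triples
def bLt (a b : Int × Int × Int) : Bool :=
  decide (a.1 < b.1) ||
    (decide (a.1 = b.1) &&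
      (decide (a.2.1 < b.2.1) || (decide (a.2.1 = b.2.1) && decide (a.2.2 < b.2.2))))

-- _insert_sorted: the items below the new one, the new one, the items not below it
def insSorted (frame : List (Int × Int × Int)) (item : Int × Int × Int) : List (Int × Int × Int) :=
  frame.filter (fun x => bLt x item) ++ [item] ++ frame.filter (fun x => !(bLt x item))

-- one iteration of B's 'for p in que' loop over the state (frame, t)
def solStepB (n : Int) (st : List (Int × Int × Int) × Int) (p : Int) : List (Int × Int × Int) × Int :=
  let frame := st.1
  let t := st.2
  let old := frame.filter (fun it => it.2.2 == p)
  match old with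
  | (votes, entry, _) :: _ =>
      (insSorted (frame.filter (fun it => !(it.2.2 == p))) (votes + 1, entry, p), t + 1)
  | [] =>
      -- if len(frame) >= n: frame = frame[1:]
      let f1 := if n ≤ (frame.length : Int) then PySem.List.slice frame (some 1) none else frame
      (insSorted f1 (1, t, p), t + 1)

def solution_alt (n : Int) (m : Int) (que : List Int) : List Int :=
  PySem.List.sorted (((que.foldl (solStepB n) ([], 0)).1).map (fun it => it.2.2)) (fun x => x) false

-- ===== PRECONDITION & SPEC =====
-- Pre_ excludes exactly the inputs where A raises ValueError (min of an empty list: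
-- n < 1 with a nonempty que); B returns a value there, but A does not.
def Pre_solution (n : Int) (m : Int) (que : List Int) : Prop := que = [] ∨ 1 ≤ n
instance (n : Int) (m : Int) (que : List Int) : Decidable (Pre_solution n m que) := by unfold Pre_solution; infer_instance

def pvWitness_solution : Int × Int × List Int := (2, 7, [5, 3, 5, 4, 3, 9])

def Spec_solution (n : Int) (m : Int) (que : List Int) (out : List Int) : Prop := out = solution_alt n m que
instance (n : Int) (m : Int) (que : List Int) (out : List Int) : Decidable (Spec_solution n m que out) := by unfold Spec_solution; infer_instance

-- ===== CLAIM (what is proved, stated in full; the proofs are below) =====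
def Claim_equal_solution : Prop := ∀ (n : Int) (m : Int) (que : List Int), Dom_solution n m que → Pre_solution n m que → Spec_solution n m que (solution n m que)

-- ===== LEMMAS AND PROOFS =====

-- the coupling invariant: frame is the (votes, entry, cand) triples of A's state,
-- for some strictly increasing list of entry times, kept sorted by Python tuple-<
def SInv (pic vote : List Int) (frame : List (Int × Int × Int)) (t : Int) : Prop :=
  ∃ ents : List Int,
    vote.length = pic.length ∧ ents.length = pic.length ∧
    ents.Pairwise (· < ·) ∧ (∀ e ∈ ents, e < t) ∧ pic.Nodup ∧
    frame.Perm (vote.zip (ents.zip pic)) ∧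
    frame.Pairwise (fun a b => bLt a b = true)

theorem bLt_iff (a b : Int × Int × Int) :
    bLt a b = true ↔
      (a.1 < b.1 ∨ (a.1 = b.1 ∧ (a.2.1 < b.2.1 ∨ (a.2.1 = b.2.1 ∧ a.2.2 < b.2.2)))) := by
  simp [bLt]

theorem bLt_trans (a b c : Int × Int × Int) (h1 : bLt a b = true) (h2 : bLt b c = true) :
    bLt a c = true := by
  rw [bLt_iff] at *
  omega

theorem bLt_total (a b : Int × Int × Int) (h : a ≠ b) : bLt a b = true ∨ bLt b a = true := by
  rcases a with ⟨a1, a2, a3⟩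
  rcases b with ⟨b1, b2, b3⟩
  simp only [bLt, ne_eq, Prod.mk.injEq, not_and, Bool.or_eq_true, Bool.and_eq_true,
    decide_eq_true_eq] at h ⊢
  omega

theorem bLt_asymm (a b : Int × Int × Int) (h1 : bLt a b = true) (h2 : bLt b a = true) : False := by
  rw [bLt_iff] at *
  omega

theorem insSorted_perm (f : List (Int × Int × Int)) (x : Int × Int × Int) :
    (insSorted f x).Perm (x :: f) := by
  unfold insSorted
  rw [List.append_assoc, List.singleton_append]
  exact List.perm_middle.trans ((List.filter_append_perm _ f).cons x)

theorem insSorted_sorted (f : List (Int × Int × Int)) (x : Int × Int × Int)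
    (hf : f.Pairwise (fun a b => bLt a b = true)) (hx : ∀ y ∈ f, y ≠ x) :
    (insSorted f x).Pairwise (fun a b => bLt a b = true) := by
  unfold insSorted
  have hxy : ∀ y ∈ f, bLt y x = false → bLt x y = true := by
    intro y hy hny
    rcases bLt_total x y (fun he => hx y hy he.symm) with h | h
    · exact h
    · rw [h] at hny; cases hny
  rw [List.append_assoc, List.singleton_append, List.pairwise_append]
  refine ⟨hf.sublist (List.filter_sublist), ?_, ?_⟩
  · rw [List.pairwise_cons]
    refine ⟨?_, hf.sublist (List.filter_sublist)⟩
    intro y hy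
    obtain ⟨hyf, hyb⟩ := List.mem_filter.mp hy
    exact hxy y hyf (by simpa using hyb)
  · intro a ha b hb
    obtain ⟨haf, hab⟩ := List.mem_filter.mp ha
    rcases List.mem_cons.mp hb with rfl | hb2
    · exact hab
    · obtain ⟨hbf, hbb⟩ := List.mem_filter.mp hb2
      exact bLt_trans a x b hab (hxy b hbf (by simpa using hbb))

-- split a list at index k
theorem split_len (xs : List Int) (k : Nat) (h : k < xs.length) :
    ∃ y ys zs, xs = ys ++ y :: zs ∧ ys.length = k := by
  refine ⟨xs[k], xs.take k, xs.drop (k + 1), ?_, by simp; omega⟩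
  conv_lhs => rw [← List.take_append_drop k xs]
  rw [List.drop_eq_getElem_cons h]

-- membership through the triple zip
theorem mem_zip3 (V E P : List Int) (y : Int × Int × Int) (h : y ∈ V.zip (E.zip P)) :
    y.1 ∈ V ∧ y.2.1 ∈ E ∧ y.2.2 ∈ P := by
  have h1 := List.of_mem_zip (show (y.1, y.2) ∈ V.zip (E.zip P) from h)
  have h2 := List.of_mem_zip (show (y.2.1, y.2.2) ∈ E.zip P from h1.2)
  exact ⟨h1.1, h2.1, h2.2⟩

theorem zip3_split (V1 V2 E1 E2 P1 P2 : List Int) (v e p : Int)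
    (h1 : V1.length = P1.length) (h2 : E1.length = P1.length) :
    (V1 ++ v :: V2).zip ((E1 ++ e :: E2).zip (P1 ++ p :: P2))
      = V1.zip (E1.zip P1) ++ (v, e, p) :: V2.zip (E2.zip P2) := by
  rw [List.zip_append h2, List.zip_cons_cons,
    List.zip_append (by rw [List.length_zip]; omega), List.zip_cons_cons]

-- the head of a bLt-sorted permutation of Z1 ++ z :: Z2, z strictly least
theorem sorted_perm_head (f Z1 Z2 : List (Int × Int × Int)) (z : Int × Int × Int)
    (hs : f.Pairwise (fun a b => bLt a b = true)) (hp : f.Perm (Z1 ++ z :: Z2))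
    (hmin : ∀ y ∈ Z1 ++ z :: Z2, y ≠ z → bLt z y = true) :
    ∃ tl, f = z :: tl ∧ tl.Perm (Z1 ++ Z2) := by
  have hzf : z ∈ f := hp.mem_iff.mpr (by simp)
  cases f with
  | nil => cases hzf
  | cons a tl =>
      have haz : a = z := by
        by_contra hne
        have hztl : z ∈ tl := by
          rcases List.mem_cons.mp hzf with h | h
          · exact absurd h.symm hne
          · exact h
        have h1 : bLt a z = true := List.rel_of_pairwise_cons hs hztl
        have h2 : bLt z a = true := hmin a (hp.mem_iff.mp (by simp)) hne
        exact bLt_asymm a z h1 h2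
      subst haz
      refine ⟨tl, rfl, ?_⟩
      exact (hp.trans List.perm_middle).cons_inv

-- no triple of the zip has candidate p when p is not in P
theorem zip3_filter_nil (V E P : List Int) (p : Int) (hp : p ∉ P) :
    (V.zip (E.zip P)).filter (fun it => it.2.2 == p) = [] := by
  rw [List.filter_eq_nil_iff]
  intro y hy
  have h3 := (mem_zip3 V E P y hy).2.2
  simp only [beq_iff_eq]
  exact fun he => hp (he ▸ h3)

theorem zip3_filter_self (V E P : List Int) (p : Int) (hp : p ∉ P) :
    (V.zip (E.zip P)).filter (fun it => !(it.2.2 == p)) = V.zip (E.zip P) := by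
  rw [List.filter_eq_self]
  intro y hy
  have h3 := (mem_zip3 V E P y hy).2.2
  simp only [Bool.not_eq_eq_eq_not, Bool.not_true, beq_eq_false_iff_ne, ne_eq]
  exact fun he => hp (he ▸ h3)

-- the main step lemma: one loop iteration preserves the invariant
theorem sol_step (n p t : Int) (pic vote : List Int) (frame : List (Int × Int × Int))
    (hn : 1 ≤ n) (h : SInv pic vote frame t) :
    SInv (solStepA n (pic, vote) p).1 (solStepA n (pic, vote) p).2
      (solStepB n (frame, t) p).1 (solStepB n (frame, t) p).2 := by
  obtain ⟨ents, hlv, hle, hep, het, hnd, hperm, hsort⟩ := h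
  have hflen : frame.length = (vote.zip (ents.zip pic)).length := hperm.length_eq
  rw [List.length_zip, List.length_zip] at hflen
  have hmemz : ∀ y ∈ frame, y ∈ vote.zip (ents.zip pic) := fun y hy => hperm.mem_iff.mp hy
  have hflen' : frame.length = pic.length := by omega
  by_cases hp : p ∈ pic
  · -- ===== case 1: p already in the frame =====
    have hc : pic.contains p = true := by simpa using hp
    obtain ⟨idx, hidx⟩ := Option.isSome_iff_exists.mp
      ((PySem.List.index?_isSome_iff pic p).mpr hp)
    obtain ⟨P1, P2, hpic, hP1len, hpP1⟩ := (PySem.List.index?_eq_some_iff pic p idx).mp hidx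
    have hidxlt : idx < pic.length := by rw [hpic]; simp; omega
    obtain ⟨v, V1, V2, hvote, hV1len⟩ := split_len vote idx (by omega)
    obtain ⟨e, E1, E2, hents, hE1len⟩ := split_len ents idx (by omega)
    have hpP2 : p ∉ P2 := by
      rw [hpic] at hnd
      exact (List.nodup_cons.mp (List.nodup_append.mp hnd).2.1).1
    have hgd : vote.getD idx 0 = v := by
      rw [hvote, ← hV1len]
      simp [List.getD_eq_getElem?_getD]
    have hset : vote.set idx (v + 1) = V1 ++ (v + 1) :: V2 := by
      rw [hvote, ← hV1len, List.set_append, if_neg (lt_irrefl _)]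
      simp
    have hA : solStepA n (pic, vote) p = (pic, V1 ++ (v + 1) :: V2) := by
      simp only [solStepA, hc, if_true, hidx, Option.getD_some, hgd, hset]
    have hz3 : vote.zip (ents.zip pic) = V1.zip (E1.zip P1) ++ (v, e, p) :: V2.zip (E2.zip P2) := by
      rw [hvote, hents, hpic]
      exact zip3_split V1 V2 E1 E2 P1 P2 v e p (hV1len.trans hP1len.symm) (hE1len.trans hP1len.symm)
    have hold : frame.filter (fun it => it.2.2 == p) = [(v, e, p)] := by
      apply List.perm_singleton.mp
      refine (hperm.filter _).trans ?_
      rw [hz3, List.filter_append, List.filter_cons]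
      simp only [beq_self_eq_true, if_pos]
      rw [zip3_filter_nil V1 E1 P1 p hpP1, zip3_filter_nil V2 E2 P2 p hpP2]
      simp
    have hrest : (frame.filter (fun it => !(it.2.2 == p))).Perm
        (V1.zip (E1.zip P1) ++ V2.zip (E2.zip P2)) := by
      refine (hperm.filter _).trans ?_
      rw [hz3, List.filter_append, List.filter_cons]
      simp only [beq_self_eq_true, Bool.not_true]
      rw [zip3_filter_self V1 E1 P1 p hpP1, zip3_filter_self V2 E2 P2 p hpP2]
      simp
    have hB : solStepB n (frame, t) p
        = (insSorted (frame.filter (fun it => !(it.2.2 == p))) (v + 1, e, p), t + 1) := by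
      simp only [solStepB, hold]
    rw [hA, hB]
    refine ⟨ents, ?_, hle, hep, fun x hx => by have := het x hx; omega, hnd, ?_, ?_⟩
    · simp only [List.length_append, List.length_cons]
      rw [hvote] at hlv
      simpa using hlv
    · have hz3' : vote.zip (ents.zip pic)
          = V1.zip (E1.zip P1) ++ (v, e, p) :: V2.zip (E2.zip P2) := hz3
      have : (V1 ++ (v + 1) :: V2).zip (ents.zip pic)
          = V1.zip (E1.zip P1) ++ (v + 1, e, p) :: V2.zip (E2.zip P2) := by
        rw [hents, hpic]
        exact zip3_split V1 V2 E1 E2 P1 P2 (v + 1) e p (hV1len.trans hP1len.symm)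
          (hE1len.trans hP1len.symm)
      rw [this]
      refine (insSorted_perm _ _).trans ?_
      exact (hrest.cons _).trans List.perm_middle.symm
    · apply insSorted_sorted
      · exact hsort.sublist List.filter_sublist
      · intro y hy
        have := (List.mem_filter.mp hy).2
        simp only [Bool.not_eq_eq_eq_not, Bool.not_true, beq_eq_false_iff_ne, ne_eq] at this
        intro he
        exact this (by rw [he])
  · -- p not in the frame
    have hc : pic.contains p = false := by simpa using hp
    have hold0 : frame.filter (fun it => it.2.2 == p) = [] := by
      apply List.Perm.eq_nil
      exact (hperm.filter _).trans (by rw [zip3_filter_nil vote ents pic p hp])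
    by_cases hroom : (pic.length : Int) < n
    · -- ===== case 2: room, append =====
      have hA : solStepA n (pic, vote) p = (pic ++ [p], vote ++ [1]) := by
        simp only [solStepA, hc, Bool.false_eq_true, if_false, if_pos hroom]
      have hB : solStepB n (frame, t) p = (insSorted frame (1, t, p), t + 1) := by
        have hcond : ¬ n ≤ (frame.length : Int) := by rw [hflen']; omega
        simp only [solStepB, hold0, if_neg hcond]
      rw [hA, hB]
      refine ⟨ents ++ [t], by simp; omega, by simp; omega, ?_, ?_, ?_, ?_, ?_⟩
      · rw [List.pairwise_append]
        exact ⟨hep, by simp, by simpa using het⟩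
      · intro x hx
        rcases List.mem_append.mp hx with h1 | h1
        · have := het x h1; omega
        · simp at h1; omega
      · rw [List.nodup_append]
        exact ⟨hnd, by simp, fun a ha b hb => by
          simp only [List.mem_singleton] at hb
          subst hb
          exact fun he => hp (he ▸ ha)⟩
      · have hz3' : (vote ++ [1]).zip ((ents ++ [t]).zip (pic ++ [p]))
            = vote.zip (ents.zip pic) ++ [((1 : Int), (t, p))] := by
          rw [List.zip_append (by omega), List.zip_append (by rw [List.length_zip]; omega)]
          rfl
        rw [hz3']
        refine (insSorted_perm _ _).trans ?_
        refine (hperm.cons _).trans ?_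
        have := List.perm_middle (a := ((1 : Int), (t, p)))
          (l₁ := vote.zip (ents.zip pic)) (l₂ := ([] : List (Int × Int × Int)))
        simpa using this.symm
      · apply insSorted_sorted _ _ hsort
        intro y hy he
        have hE := (mem_zip3 vote ents pic y (hmemz y hy)).2.1
        have := het _ hE
        rw [he] at this
        simp at this
    · -- ===== case 3: eviction =====
      have hlen1 : 1 ≤ pic.length := by omega
      have hvne : vote ≠ [] := by
        intro hv
        rw [hv] at hlv
        simp at hlv
        omega
      obtain ⟨mn, hmn⟩ : ∃ mn, PySem.List.min? vote (id : Int → Int) = some mn := by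
        cases hm : PySem.List.min? vote (id : Int → Int) with
        | none => exact absurd ((PySem.List.min?_eq_none_iff vote id).mp hm) hvne
        | some mn => exact ⟨mn, rfl⟩
      have hmnmem : mn ∈ vote := PySem.List.min?_mem hmn
      have hmnmin : ∀ y ∈ vote, mn ≤ y := fun y hy => PySem.List.min?_isMin hmn y hy
      obtain ⟨idx, hidxv⟩ := Option.isSome_iff_exists.mp
        ((PySem.List.index?_isSome_iff vote mn).mpr hmnmem)
      obtain ⟨L, R, hvote, hLlen, hmnL⟩ := (PySem.List.index?_eq_some_iff vote mn idx).mp hidxv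
      have hidxlt : idx < vote.length := by rw [hvote]; simp; omega
      obtain ⟨c, P1, P2, hpic, hP1len⟩ := split_len pic idx (by omega)
      obtain ⟨e, E1, E2, hents, hE1len⟩ := split_len ents idx (by omega)
      have hz3 : vote.zip (ents.zip pic)
          = L.zip (E1.zip P1) ++ (mn, e, c) :: R.zip (E2.zip P2) := by
        rw [hvote, hents, hpic]
        exact zip3_split L R E1 E2 P1 P2 mn e c (hLlen.trans hP1len.symm)
          (hE1len.trans hP1len.symm)
      have heE2 : ∀ x ∈ E2, e < x := by
        have h0 := hents ▸ hep
        exact fun x hx => List.rel_of_pairwise_cons (List.pairwise_append.mp h0).2.1 hx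
      have hminall : ∀ y ∈ L.zip (E1.zip P1) ++ (mn, e, c) :: R.zip (E2.zip P2),
          y ≠ (mn, e, c) → bLt (mn, e, c) y = true := by
        intro y hy hne
        rcases List.mem_append.mp hy with h1 | h1
        · have hyL := (mem_zip3 L E1 P1 y h1).1
          have hlt : mn < y.1 := by
            have h2 : mn ≤ y.1 := hmnmin _ (by rw [hvote]; exact List.mem_append.mpr (Or.inl hyL))
            rcases lt_or_eq_of_le h2 with h3 | h3
            · exact h3
            · exact absurd (h3 ▸ hyL) hmnL
          rw [bLt_iff]; left; exact hlt
        · rcases List.mem_cons.mp h1 with rfl | h2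
          · exact absurd rfl hne
          · have hyR := (mem_zip3 R E2 P2 y h2).1
            have hyE := (mem_zip3 R E2 P2 y h2).2.1
            have h3 : mn ≤ y.1 := hmnmin _ (by
              rw [hvote]; exact List.mem_append.mpr (Or.inr (List.mem_cons_of_mem _ hyR)))
            rw [bLt_iff]
            rcases lt_or_eq_of_le h3 with h4 | h4
            · left; exact h4
            · right; exact ⟨h4.symm ▸ rfl, Or.inl (heE2 _ hyE)⟩
      obtain ⟨tl, hfr, htl⟩ := sorted_perm_head frame _ _ (mn, e, c) hsort (hperm.trans (hz3 ▸ List.Perm.refl _)) hminall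
      -- A side
      have hcastidx : (idx : Int) + 1 = ((idx + 1 : Nat) : Int) := by push_cast; ring
      have htakeV : PySem.List.slice vote none (some (idx : Int)) = L := by
        rw [PySem.List.slice_to_natCast, hvote, List.take_left' hLlen]
      have hdropV : PySem.List.slice vote (some ((idx : Int) + 1)) none = R := by
        rw [hcastidx, PySem.List.slice_from_natCast, hvote,
          show L ++ mn :: R = (L ++ [mn]) ++ R by simp,
          List.drop_left' (by simp [hLlen])]
      have htakeP : PySem.List.slice pic none (some (idx : Int)) = P1 := by
        rw [PySem.List.slice_to_natCast, hpic, List.take_left' hP1len]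
      have hdropP : PySem.List.slice pic (some ((idx : Int) + 1)) none = P2 := by
        rw [hcastidx, PySem.List.slice_from_natCast, hpic,
          show P1 ++ c :: P2 = (P1 ++ [c]) ++ P2 by simp,
          List.drop_left' (by simp [hP1len])]
      have hA : solStepA n (pic, vote) p = (P1 ++ P2 ++ [p], L ++ R ++ [1]) := by
        simp only [solStepA, hc, Bool.false_eq_true, if_false, if_neg hroom, hmn, hidxv,
          Option.getD_some, htakeV, hdropV, htakeP, hdropP]
      -- B side
      have hB : solStepB n (frame, t) p = (insSorted tl (1, t, p), t + 1) := by
        have hcond : n ≤ (frame.length : Int) := by rw [hflen']; omega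
        simp only [solStepB, hold0]
        rw [if_pos hcond, hfr, PySem.List.slice_from_one, List.tail_cons]
      rw [hA, hB]
      -- lengths of the pieces
      have hlens : L.length = P1.length ∧ E1.length = P1.length ∧ R.length = P2.length
          ∧ E2.length = P2.length := by
        have l1 : vote.length = L.length + 1 + R.length := by rw [hvote]; simp; omega
        have l2 : pic.length = P1.length + 1 + P2.length := by rw [hpic]; simp; omega
        have l3 : ents.length = E1.length + 1 + E2.length := by rw [hents]; simp; omega
        refine ⟨hLlen.trans hP1len.symm, hE1len.trans hP1len.symm, ?_, ?_⟩ <;> omega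
      refine ⟨E1 ++ E2 ++ [t], by simp; omega, by simp; omega, ?_, ?_, ?_, ?_, ?_⟩
      · have hsub : (E1 ++ E2).Sublist ents := by
          rw [hents]
          exact List.Sublist.append_left (List.sublist_cons_self e E2) E1
        rw [List.pairwise_append]
        refine ⟨hep.sublist hsub, by simp, ?_⟩
        intro a ha b hb
        simp at hb
        subst hb
        exact het a (hsub.mem ha)
      · intro x hx
        rcases List.mem_append.mp hx with h1 | h1
        · have hsub : (E1 ++ E2).Sublist ents := by
            rw [hents]
            exact List.Sublist.append_left (List.sublist_cons_self e E2) E1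
          have := het x (hsub.mem h1); omega
        · simp at h1; omega
      · have hsub : (P1 ++ P2).Sublist pic := by
          rw [hpic]
          exact List.Sublist.append_left (List.sublist_cons_self c P2) P1
        rw [List.nodup_append]
        refine ⟨hnd.sublist hsub, by simp, ?_⟩
        intro a ha b hb
        simp at hb
        subst hb
        exact fun he => hp (hsub.mem (he ▸ ha))
      · have hz3' : (L ++ R ++ [1]).zip ((E1 ++ E2 ++ [t]).zip (P1 ++ P2 ++ [p]))
            = (L.zip (E1.zip P1) ++ R.zip (E2.zip P2)) ++ [((1 : Int), (t, p))] := by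
          rw [List.zip_append (l₁ := E1 ++ E2) (by simp; omega),
            List.zip_append (l₁ := L ++ R) (by rw [List.length_zip]; simp; omega),
            List.zip_append (l₁ := E1) (by omega),
            List.zip_append (l₁ := L) (by rw [List.length_zip]; omega)]
          rfl
        rw [hz3']
        refine (insSorted_perm _ _).trans ?_
        refine (htl.cons _).trans ?_
        have := List.perm_middle (a := ((1 : Int), (t, p)))
          (l₁ := L.zip (E1.zip P1) ++ R.zip (E2.zip P2)) (l₂ := ([] : List (Int × Int × Int)))
        simpa using this.symm
      · apply insSorted_sorted
        · have := hfr ▸ hsort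
          exact (List.pairwise_cons.mp this).2
        · intro y hy he
          have hyf : y ∈ frame := by rw [hfr]; exact List.mem_cons_of_mem _ hy
          have hE := (mem_zip3 vote ents pic y (hmemz y hyf)).2.1
          have := het _ hE
          rw [he] at this
          simp at this

theorem sol_fold (n : Int) (que : List Int) (pic vote : List Int)
    (frame : List (Int × Int × Int)) (t : Int) (hn : 1 ≤ n) (h : SInv pic vote frame t) :
    SInv (que.foldl (solStepA n) (pic, vote)).1 (que.foldl (solStepA n) (pic, vote)).2
      (que.foldl (solStepB n) (frame, t)).1 (que.foldl (solStepB n) (frame, t)).2 := by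
  induction que generalizing pic vote frame t with
  | nil => exact h
  | cons q qs ih =>
      simp only [List.foldl_cons]
      have hstep := sol_step n q t pic vote frame hn h
      have ha : solStepA n (pic, vote) q = ((solStepA n (pic, vote) q).1, (solStepA n (pic, vote) q).2) := rfl
      have hb : solStepB n (frame, t) q = ((solStepB n (frame, t) q).1, (solStepB n (frame, t) q).2) := rfl
      rw [ha, hb]
      exact ih _ _ _ _ hstep

-- ===== VERDICT (by name: the statement is the Claim_ definition above) =====
theorem solution_spec : Claim_equal_solution := by
  intro n m que _ hpre
  unfold Spec_solution solution solution_alt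
  rcases hpre with rfl | hn
  · rfl
  · have h0 : SInv [] [] [] 0 := ⟨[], by simp⟩
    obtain ⟨ents, hlv, hle, _, _, _, hperm, _⟩ := sol_fold n que [] [] [] 0 hn h0
    have hmap : ((que.foldl (solStepB n) ([], 0)).1.map (fun it => it.2.2)).Perm
        (que.foldl (solStepA n) ([], [])).1 := by
      have h1 := hperm.map (fun it : Int × Int × Int => it.2.2)
      have h2 : (((que.foldl (solStepA n) ([], [])).2.zip
          (ents.zip (que.foldl (solStepA n) ([], [])).1)).map (fun it => it.2.2))
          = (que.foldl (solStepA n) ([], [])).1 := by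
        have e1 := List.map_snd_zip
          (l₁ := (que.foldl (solStepA n) ([], [])).2)
          (l₂ := ents.zip (que.foldl (solStepA n) ([], [])).1)
          (by rw [List.length_zip]; omega)
        have e2 := List.map_snd_zip (l₁ := ents)
          (l₂ := (que.foldl (solStepA n) ([], [])).1) (by omega)
        calc ((que.foldl (solStepA n) ([], [])).2.zip
            (ents.zip (que.foldl (solStepA n) ([], [])).1)).map (fun it => it.2.2)
            = (((que.foldl (solStepA n) ([], [])).2.zip
              (ents.zip (que.foldl (solStepA n) ([], [])).1)).map Prod.snd).map Prod.snd := by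
                rw [List.map_map]; rfl
          _ = _ := by rw [e1, e2]
      exact h2 ▸ h1
    exact ((PySem.List.sorted_id_eq_sorted_id_iff_perm _ _).mpr hmap).symm
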